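-- pv_equiv track=rewrite | github.com/SharanappaPooja/python-problems | special_string.py | min_total_ascii_distance
-- ===== SOURCE A (Python) =====
-- def min_total_ascii_distance(A, S):
--     total_distance = 0
--
--     for i in A:
--         min_distance = float('inf')
--         for j in S:
--             distance = abs(ord(i) - ord(j))
--             if distance < min_distance:
--                 min_distance = distance
--         total_distance += min_distance
--
--     return total_distance
-- ===== SOURCE B (Python) =====
-- def min_total_ascii_distance(A, S):
--     # Two-sweep nearest-distance table over the ASCII code line: for every code v,
--     # nearest[v] = distance to the closest code present in S, computed by one
--     # left-to-right and one right-to-left propagation; then one lookup per char of A.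
--     codes = set(map(ord, S))
--     INF = float('inf')
--     left = []
--     best = INF
--     for v in range(128):
--         best = 0 if v in codes else best + 1
--         left.append(best)
--     nearest = [INF] * 128
--     best = INF
--     for v in range(127, -1, -1):
--         best = 0 if v in codes else best + 1
--         nearest[v] = min(left[v], best)
--     return sum(nearest[ord(c)] for c in A)
-- ===== Notes on version B (the rewrite author's own statement) =====
-- stated objective: faster
-- what changed: B replaces the per-character scan of S by a 128-entry nearest-distance table built with two linear sweeps (left-to-right and right-to-left propagation) over the ASCII code line, then answers each character of A by one table lookup.
-- outside the precondition, e.g. on min_total_ascii_distance('a', ''): A returns inf, B returns inf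
import Mathlib
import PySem

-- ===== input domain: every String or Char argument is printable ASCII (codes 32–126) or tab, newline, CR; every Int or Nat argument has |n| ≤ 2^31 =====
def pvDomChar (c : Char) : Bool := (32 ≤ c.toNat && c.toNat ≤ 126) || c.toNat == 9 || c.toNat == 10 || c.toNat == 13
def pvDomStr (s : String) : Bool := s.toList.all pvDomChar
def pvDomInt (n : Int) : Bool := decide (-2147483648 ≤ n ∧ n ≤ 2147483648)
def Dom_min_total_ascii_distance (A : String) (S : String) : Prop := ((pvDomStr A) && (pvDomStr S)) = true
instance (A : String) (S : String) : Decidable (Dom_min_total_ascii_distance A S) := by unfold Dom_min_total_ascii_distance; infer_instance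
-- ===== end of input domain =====

-- B replaces A's per-character scan of S by a 128-entry nearest-distance table built with two
-- linear sweeps over the ASCII code line; equal to A wherever A returns an int (S nonempty or A empty).

-- ===== PORT A =====
-- inner loop's min_distance starts at float('inf'); ported as Option Int with none = inf
-- (under Pre_ the inner loop runs over a nonempty S, so the accumulator is some and .getD 0 is never the inf case)
def min_total_ascii_distance (A : String) (S : String) : Int :=
  A.toList.foldl (fun total i =>
    let m : Option Int := S.toList.foldl (fun (m : Option Int) j =>
      let d : Int := |(i.toNat : Int) - (j.toNat : Int)|
      match m with
      | none => some d
      | some mv => if d < mv then some d else some mv) none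
    total + m.getD 0) 0

-- ===== PORT B =====
-- Python's min on possibly-inf values, with none = float('inf')
def pvOMin : Option Int → Option Int → Option Int
  | none, b => b
  | some a, none => some a
  | some a, some b => some (min a b)

-- left/right sweeps carry best = nearest distance so far (none = inf, best+1 = Option.map (+1));
-- the second Python loop writes nearest[v] for v = 127 … 0 in place, built here by cons in the same order
def min_total_ascii_distance_alt (A : String) (S : String) : Int :=
  let codes : PySem.Set Int := PySem.Set.ofList (S.toList.map (fun j => (j.toNat : Int)))
  let left : List (Option Int) :=
    ((PySem.List.pyRange 0 128 1).foldl
      (fun (st : Option Int × List (Option Int)) v =>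
        let best := if v ∈ codes then some (0 : Int) else st.1.map (· + 1)
        (best, st.2 ++ [best])) (none, [])).2
  let nearest : List (Option Int) :=
    ((PySem.List.pyRange 127 (-1) (-1)).foldl
      (fun (st : Option Int × List (Option Int)) v =>
        let best := if v ∈ codes then some (0 : Int) else st.1.map (· + 1)
        (best, pvOMin (left.getD v.toNat none) best :: st.2)) (none, [])).2
  A.toList.foldl (fun t c => t + (nearest.getD c.toNat none).getD 0) 0

-- ===== PRECONDITION & SPEC =====
-- Pre_ excludes nonempty A with empty S: there both programs return float('inf'), not an int.
def Pre_min_total_ascii_distance (A : String) (S : String) : Prop :=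
  A.toList = [] ∨ S.toList ≠ []
instance (A : String) (S : String) : Decidable (Pre_min_total_ascii_distance A S) := by
  unfold Pre_min_total_ascii_distance; infer_instance

def pvWitness_min_total_ascii_distance : String × String := ("abca", "xy")

def Spec_min_total_ascii_distance (A : String) (S : String) (out : Int) : Prop := out = min_total_ascii_distance_alt A S
instance (A : String) (S : String) (out : Int) : Decidable (Spec_min_total_ascii_distance A S out) := by unfold Spec_min_total_ascii_distance; infer_instance

-- ===== CLAIM (what is proved, stated in full; the proofs are below) =====
def Claim_equal_min_total_ascii_distance : Prop := ∀ (A : String) (S : String), Dom_min_total_ascii_distance A S → Pre_min_total_ascii_distance A S → Spec_min_total_ascii_distance A S (min_total_ascii_distance A S)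

-- ===== LEMMAS AND PROOFS =====

-- nearest set-code at or below v (what the left sweep's best holds after processing v)
def pvNL (cs : List Int) : Nat → Option Int
  | 0 => if (0 : Int) ∈ cs then some 0 else none
  | v + 1 => if ((v : Int) + 1) ∈ cs then some 0 else (pvNL cs v).map (· + 1)

-- nearest set-code at or above 127 - k (best after the right sweep has processed k+1 values)
def pvNR (cs : List Int) : Nat → Option Int
  | 0 => if (127 : Int) ∈ cs then some 0 else none
  | k + 1 => if (126 - (k : Int)) ∈ cs then some 0 else (pvNR cs k).map (· + 1)

lemma pvNL_sound (cs : List Int) : ∀ (v : Nat) (d : Int), pvNL cs v = some d →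
    ∃ s ∈ cs, s ≤ (v : Int) ∧ d = (v : Int) - s := by
  intro v
  induction v with
  | zero =>
    intro d h
    by_cases h0 : (0 : Int) ∈ cs
    · simp [pvNL, h0] at h
      exact ⟨0, h0, le_refl _, by omega⟩
    · simp [pvNL, h0] at h
  | succ v ih =>
    intro d h
    by_cases h0 : ((v : Int) + 1) ∈ cs
    · simp [pvNL, h0] at h
      exact ⟨(v : Int) + 1, h0, by push_cast; omega, by push_cast; omega⟩
    · simp [pvNL, h0, Option.map_eq_some_iff] at h
      obtain ⟨d', hd', rfl⟩ := h
      obtain ⟨s, hs, hle, rfl⟩ := ih d' hd'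
      exact ⟨s, hs, by push_cast; omega, by push_cast; omega⟩

lemma pvNL_complete (cs : List Int) : ∀ (v : Nat) (s : Int), s ∈ cs → 0 ≤ s → s ≤ (v : Int) →
    ∃ d, pvNL cs v = some d ∧ d ≤ (v : Int) - s := by
  intro v
  induction v with
  | zero =>
    intro s hs h0 h1
    have hz : s = 0 := by omega
    subst hz
    exact ⟨0, by simp [pvNL, hs], by omega⟩
  | succ v ih =>
    intro s hs h0 h1
    by_cases hm : ((v : Int) + 1) ∈ cs
    · exact ⟨0, by simp [pvNL, hm], by push_cast; omega⟩
    · have hsv : s ≤ (v : Int) := by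
        rcases eq_or_lt_of_le h1 with he | hl
        · exfalso; apply hm; rw [show ((v : Int) + 1) = s by push_cast at he ⊢; omega]; exact hs
        · push_cast at hl ⊢; omega
      obtain ⟨d, hd, hdl⟩ := ih s hs h0 hsv
      exact ⟨d + 1, by simp [pvNL, hm, hd], by push_cast; omega⟩

lemma pvNR_sound (cs : List Int) : ∀ (k : Nat) (d : Int), pvNR cs k = some d →
    ∃ s ∈ cs, 127 - (k : Int) ≤ s ∧ d = s - (127 - (k : Int)) := by
  intro k
  induction k with
  | zero =>
    intro d h
    by_cases h0 : (127 : Int) ∈ cs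
    · simp [pvNR, h0] at h
      exact ⟨127, h0, by omega, by omega⟩
    · simp [pvNR, h0] at h
  | succ k ih =>
    intro d h
    by_cases h0 : (126 - (k : Int)) ∈ cs
    · simp [pvNR, h0] at h
      exact ⟨126 - (k : Int), h0, by push_cast; omega, by push_cast; omega⟩
    · simp [pvNR, h0, Option.map_eq_some_iff] at h
      obtain ⟨d', hd', rfl⟩ := h
      obtain ⟨s, hs, hle, rfl⟩ := ih d' hd'
      exact ⟨s, hs, by push_cast; omega, by push_cast; omega⟩

lemma pvNR_complete (cs : List Int) : ∀ (k : Nat) (s : Int), s ∈ cs → 127 - (k : Int) ≤ s → s ≤ 127 →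
    ∃ d, pvNR cs k = some d ∧ d ≤ s - (127 - (k : Int)) := by
  intro k
  induction k with
  | zero =>
    intro s hs h0 h1
    have hz : s = 127 := by omega
    subst hz
    exact ⟨0, by simp [pvNR, hs], by omega⟩
  | succ k ih =>
    intro s hs h0 h1
    by_cases hm : (126 - (k : Int)) ∈ cs
    · exact ⟨0, by simp [pvNR, hm], by push_cast at h0 ⊢; omega⟩
    · have hsv : 127 - (k : Int) ≤ s := by
        rcases eq_or_lt_of_le h0 with he | hl
        · exfalso; apply hm; rw [show (126 - (k : Int)) = s by push_cast at he ⊢; omega]; exact hs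
        · push_cast at hl ⊢; omega
      obtain ⟨d, hd, hdl⟩ := ih s hs hsv h1
      exact ⟨d + 1, by simp [pvNR, hm, hd], by push_cast at hdl ⊢; omega⟩

-- the combined table value at v is the exact minimum distance to cs
lemma pvNear_min (cs : List Int) (hb : ∀ s ∈ cs, 0 ≤ s ∧ s ≤ 127) (v : Nat) (hv : v ≤ 127)
    (c0 : Int) (hc0 : c0 ∈ cs) :
    ∃ m, pvOMin (pvNL cs v) (pvNR cs (127 - v)) = some m ∧
      (∃ s ∈ cs, m = |(v : Int) - s|) ∧ (∀ s ∈ cs, m ≤ |(v : Int) - s|) := by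
  have hk : ((127 - v : Nat) : Int) = 127 - (v : Int) := by push_cast [hv]; omega
  have habs1 : ∀ s : Int, s ≤ (v : Int) → |(v : Int) - s| = (v : Int) - s :=
    fun s h => abs_of_nonneg (by omega)
  have habs2 : ∀ s : Int, (v : Int) ≤ s → |(v : Int) - s| = s - (v : Int) := by
    intro s h; rw [abs_sub_comm]; exact abs_of_nonneg (by omega)
  -- upper-bound facts for each side
  have hL : ∀ s ∈ cs, s ≤ (v : Int) → ∃ d, pvNL cs v = some d ∧ d ≤ |(v : Int) - s| := by
    intro s hs hsv
    obtain ⟨d, hd, hdl⟩ := pvNL_complete cs v s hs (hb s hs).1 hsv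
    exact ⟨d, hd, by rw [habs1 s hsv]; exact hdl⟩
  have hR : ∀ s ∈ cs, (v : Int) ≤ s → ∃ d, pvNR cs (127 - v) = some d ∧ d ≤ |(v : Int) - s| := by
    intro s hs hsv
    obtain ⟨d, hd, hdl⟩ := pvNR_complete cs (127 - v) s hs (by rw [hk]; omega) (hb s hs).2
    exact ⟨d, hd, by rw [habs2 s hsv, hk] at *; omega⟩
  cases hna : pvNL cs v with
  | none =>
    cases hnb : pvNR cs (127 - v) with
    | none =>
      exfalso
      rcases le_total c0 (v : Int) with h | h
      · obtain ⟨d, hd, -⟩ := hL c0 hc0 h; rw [hna] at hd; simp at hd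
      · obtain ⟨d, hd, -⟩ := hR c0 hc0 h; rw [hnb] at hd; simp at hd
    | some b =>
      refine ⟨b, rfl, ?_, ?_⟩
      · obtain ⟨s, hs, hvs, rfl⟩ := pvNR_sound cs (127 - v) b hnb
        rw [hk] at hvs
        exact ⟨s, hs, by rw [habs2 s (by omega)]; omega⟩
      · intro s hs
        rcases le_total s (v : Int) with h | h
        · obtain ⟨d, hd, -⟩ := hL s hs h; rw [hna] at hd; exact absurd hd (by simp)
        · obtain ⟨d, hd, hdl⟩ := hR s hs h
          rw [hnb] at hd; injection hd with hd; omega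
  | some a =>
    cases hnb : pvNR cs (127 - v) with
    | none =>
      refine ⟨a, rfl, ?_, ?_⟩
      · obtain ⟨s, hs, hvs, rfl⟩ := pvNL_sound cs v a hna
        exact ⟨s, hs, by rw [habs1 s hvs]⟩
      · intro s hs
        rcases le_total s (v : Int) with h | h
        · obtain ⟨d, hd, hdl⟩ := hL s hs h
          rw [hna] at hd; injection hd with hd; omega
        · obtain ⟨d, hd, -⟩ := hR s hs h; rw [hnb] at hd; simp at hd
    | some b =>
      refine ⟨min a b, rfl, ?_, ?_⟩
      · rcases min_cases a b with ⟨hm, -⟩ | ⟨hm, -⟩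
        · obtain ⟨s, hs, hvs, rfl⟩ := pvNL_sound cs v a hna
          exact ⟨s, hs, by rw [hm, habs1 s hvs]⟩
        · obtain ⟨s, hs, hvs, rfl⟩ := pvNR_sound cs (127 - v) b hnb
          rw [hk] at hvs
          exact ⟨s, hs, by rw [hm, habs2 s (by omega)]; omega⟩
      · intro s hs
        rcases le_total s (v : Int) with h | h
        · obtain ⟨d, hd, hdl⟩ := hL s hs h
          rw [hna] at hd; injection hd with hd
          calc min a b ≤ a := min_le_left a b
            _ ≤ _ := by omega
        · obtain ⟨d, hd, hdl⟩ := hR s hs h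
          rw [hnb] at hd; injection hd with hd
          calc min a b ≤ b := min_le_right a b
            _ ≤ _ := by omega

-- the left sweep builds the pvNL table
lemma pvLeftFold (cs : PySem.Set Int) : ∀ (n : Nat), 1 ≤ n →
    ((PySem.List.pyRange 0 (n : Int) 1).foldl
      (fun (st : Option Int × List (Option Int)) v =>
        let best := if v ∈ cs then some (0 : Int) else st.1.map (· + 1)
        (best, st.2 ++ [best])) (none, []))
    = (pvNL cs (n - 1), (List.range n).map (pvNL cs)) := by
  intro n hn
  induction n, hn using Nat.le_induction with
  | base =>
    rw [show ((1 : Nat) : Int) = 1 from by norm_num,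
        PySem.List.pyRange_one_cons (by norm_num), PySem.List.pyRange_one_eq_nil (by norm_num)]
    simp [pvNL, List.range_succ]
  | succ n hn ih =>
    rw [show (((n + 1 : Nat)) : Int) = (n : Int) + 1 from by push_cast; ring,
        PySem.List.pyRange_one_succ_right (by positivity), List.foldl_append, ih]
    simp only [List.foldl_cons, List.foldl_nil]
    have hstep : (if (n : Int) ∈ cs then some (0 : Int) else (pvNL cs (n - 1)).map (· + 1))
        = pvNL cs n := by
      obtain ⟨m, rfl⟩ := Nat.exists_eq_add_of_le hn
      simp only [Nat.add_sub_cancel_left] at *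
      rw [show ((1 + m : Nat) : Int) = (m : Int) + 1 from by push_cast; ring]
      rw [show (1 + m) = m + 1 from by omega]
      rfl
    rw [hstep, List.range_succ]
    simp

-- the right sweep, below its first step, builds pvOMin of the two tables
lemma pvRightFoldAux (cs : PySem.Set Int) (left : List (Option Int)) :
    ∀ (j : Nat), j ≤ 127 → ∀ (acc : List (Option Int)),
    ((PySem.List.pyRange ((j : Int) - 1) (-1) (-1)).foldl
      (fun (st : Option Int × List (Option Int)) v =>
        let best := if v ∈ cs then some (0 : Int) else st.1.map (· + 1)
        (best, pvOMin (left.getD v.toNat none) best :: st.2)) (pvNR cs (127 - j), acc))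
    = (pvNR cs 127,
       ((List.range j).map (fun v => pvOMin (left.getD v none) (pvNR cs (127 - v)))) ++ acc) := by
  intro j
  induction j with
  | zero =>
    intro _ acc
    rw [show ((0 : Nat) : Int) - 1 = -1 from by norm_num, PySem.List.pyRange_neg_one_eq_nil (by norm_num)]
    simp
  | succ j ih =>
    intro hj acc
    rw [show (((j + 1 : Nat)) : Int) - 1 = (j : Int) from by push_cast; ring,
        PySem.List.pyRange_neg_one_cons (by omega), List.foldl_cons]
    have hbest : (if (j : Int) ∈ cs then some (0 : Int) else (pvNR cs (127 - (j + 1))).map (· + 1))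
        = pvNR cs (127 - j) := by
      have h1 : 127 - j = (127 - (j + 1)) + 1 := by omega
      rw [h1]
      have h2 : (126 - ((127 - (j + 1) : Nat) : Int)) = (j : Int) := by
        have : ((127 - (j + 1) : Nat) : Int) = 127 - ((j : Int) + 1) := by push_cast [hj]; omega
        rw [this]; ring
      show _ = pvNR cs ((127 - (j + 1)) + 1)
      rw [pvNR, h2]
    simp only [hbest, Int.toNat_natCast]
    rw [ih (by omega) _]
    rw [List.range_succ]
    simp

-- A's inner running-min fold, from a concrete accumulator, is a plain Int min fold
lemma pvInnerA_some (c : Char) (t : List Char) : ∀ (m : Int),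
    t.foldl (fun (m : Option Int) j =>
      let d : Int := |(c.toNat : Int) - (j.toNat : Int)|
      match m with
      | none => some d
      | some mv => if d < mv then some d else some mv) (some m)
    = some (t.foldl (fun mv j => min mv (|(c.toNat : Int) - (j.toNat : Int)|)) m) := by
  induction t with
  | nil => intro m; rfl
  | cons j t ih =>
    intro m
    simp only [List.foldl_cons]
    rw [show (if |(c.toNat : Int) - (j.toNat : Int)| < m then some (|(c.toNat : Int) - (j.toNat : Int)|) else some m)
      = some (min m (|(c.toNat : Int) - (j.toNat : Int)|)) from by
        split_ifs with h <;> simp [min_def] <;> omega]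
    exact ih _

-- pointwise-equal-on-members step functions give equal foldl results
lemma pvFoldl_congr (f g : Int → Char → Int) (l : List Char)
    (h : ∀ b ∈ l, ∀ a, f a b = g a b) : ∀ (a : Int), l.foldl f a = l.foldl g a := by
  induction l with
  | nil => intro a; rfl
  | cons b l ih =>
    intro a
    simp only [List.foldl_cons]
    rw [h b (by simp)]
    exact ih (fun b hb a => h b (by simp [hb]) a) _

-- the whole right sweep: its first step then pvRightFoldAux
lemma pvNearestEq (cs : PySem.Set Int) (left : List (Option Int)) :
    ((PySem.List.pyRange 127 (-1) (-1)).foldl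
      (fun (st : Option Int × List (Option Int)) v =>
        let best := if v ∈ cs then some (0 : Int) else st.1.map (· + 1)
        (best, pvOMin (left.getD v.toNat none) best :: st.2)) (none, [])).2
    = (List.range 128).map (fun v => pvOMin (left.getD v none) (pvNR cs (127 - v))) := by
  rw [PySem.List.pyRange_neg_one_cons (by norm_num), List.foldl_cons]
  show (List.foldl
      (fun (st : Option Int × List (Option Int)) v =>
        let best := if v ∈ cs then some (0 : Int) else st.1.map (· + 1)
        (best, pvOMin (left.getD v.toNat none) best :: st.2))
      (pvNR cs (127 - 127), [pvOMin (left.getD 127 none) (pvNR cs (127 - 127))])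
      (PySem.List.pyRange (127 - 1) (-1) (-1))).2
    = List.map (fun v => pvOMin (left.getD v none) (pvNR cs (127 - v))) (List.range 128)
  rw [show ((127 : Int) - 1) = ((127 : Nat) : Int) - 1 from by norm_num,
      pvRightFoldAux cs left 127 (by norm_num),
      show List.range 128 = List.range 127 ++ [127] from by
        rw [show (128 : Nat) = 127 + 1 from rfl, List.range_succ]]
  simp

-- index into a length-128 table built by map over range
lemma pvGetD_map_range (f : Nat → Option Int) (i : Nat) (h : i < 128) :
    ((List.range 128).map f).getD i none = f i := by
  rw [List.getD_eq_getElem?_getD, List.getElem?_map, List.getElem?_range h]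
  rfl

-- per character of A, A's inner scan of S equals B's table lookup
lemma pvChar_eq (S : String) (j0 : Char) (t0 : List Char) (hS0 : S.toList = j0 :: t0)
    (hDS : ∀ j ∈ S.toList, j.toNat ≤ 126) (c : Char) (hc : c.toNat ≤ 126) :
    (S.toList.foldl (fun (m : Option Int) j =>
      let d : Int := |(c.toNat : Int) - (j.toNat : Int)|
      match m with
      | none => some d
      | some mv => if d < mv then some d else some mv) none).getD 0
    = ((((List.range 128).map (fun v =>
          pvOMin (((List.range 128).map
            (pvNL (PySem.Set.ofList (S.toList.map (fun j => ((j.toNat : Int))))))).getD v none)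
            (pvNR (PySem.Set.ofList (S.toList.map (fun j => ((j.toNat : Int))))) (127 - v)))).getD
        c.toNat none).getD 0) := by
  set cs := PySem.Set.ofList (S.toList.map (fun j => ((j.toNat : Int)))) with hcs
  have hmem : ∀ s, s ∈ cs ↔ ∃ j ∈ S.toList, s = (j.toNat : Int) := by
    intro s
    rw [hcs, PySem.Set.mem_ofList, List.mem_map]
    constructor
    · rintro ⟨j, hj, rfl⟩; exact ⟨j, hj, rfl⟩
    · rintro ⟨j, hj, rfl⟩; exact ⟨j, hj, rfl⟩
  have hbnd : ∀ s ∈ cs, 0 ≤ s ∧ s ≤ 127 := by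
    intro s hs
    obtain ⟨j, hj, rfl⟩ := (hmem s).mp hs
    exact ⟨by positivity, by have := hDS j hj; omega⟩
  have hc0 : ((j0.toNat : Int)) ∈ cs := (hmem _).mpr ⟨j0, by rw [hS0]; exact List.mem_cons_self, rfl⟩
  -- B's side: the table lookup is the exact minimum
  obtain ⟨m, hm, ⟨sB, hsB, hmB⟩, hmin⟩ := pvNear_min cs hbnd c.toNat (by omega) _ hc0
  rw [pvGetD_map_range _ c.toNat (by omega), pvGetD_map_range _ c.toNat (by omega), hm]
  -- A's side: the running minimum of the distances
  rw [hS0, List.foldl_cons]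
  show ((t0.foldl _ (some (|(c.toNat : Int) - (j0.toNat : Int)|))).getD 0) = _
  rw [pvInnerA_some c t0]
  rw [show (t0.foldl (fun mv j => min mv (|(c.toNat : Int) - (j.toNat : Int)|))
        (|(c.toNat : Int) - (j0.toNat : Int)|))
      = ((t0.map (fun j => |(c.toNat : Int) - (j.toNat : Int)|)).foldl min
        (|(c.toNat : Int) - (j0.toNat : Int)|)) from by rw [List.foldl_map]]
  simp only [Option.getD_some]
  -- mutual bounds
  obtain ⟨hle0, hleAll⟩ := PySem.List.foldl_min_le
    (t0.map (fun j => |(c.toNat : Int) - (j.toNat : Int)|)) (|(c.toNat : Int) - (j0.toNat : Int)|)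
  have hAmem := PySem.List.foldl_min_mem
    (t0.map (fun j => |(c.toNat : Int) - (j.toNat : Int)|)) (|(c.toNat : Int) - (j0.toNat : Int)|)
  -- m ≤ A's value
  have h1 : m ≤ (t0.map (fun j => |(c.toNat : Int) - (j.toNat : Int)|)).foldl min
      (|(c.toNat : Int) - (j0.toNat : Int)|) := by
    rcases hAmem with he | he
    · rw [he]; exact hmin _ hc0
    · obtain ⟨j, hj, he'⟩ := List.mem_map.mp he
      rw [← he']
      exact hmin _ ((hmem _).mpr ⟨j, by rw [hS0]; exact List.mem_cons_of_mem _ hj, rfl⟩)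
  -- A's value ≤ m
  have h2 : (t0.map (fun j => |(c.toNat : Int) - (j.toNat : Int)|)).foldl min
      (|(c.toNat : Int) - (j0.toNat : Int)|) ≤ m := by
    obtain ⟨j, hj, rfl⟩ := (hmem sB).mp hsB
    rw [hS0] at hj
    rcases List.mem_cons.mp hj with rfl | hj'
    · rw [hmB]; exact hle0
    · rw [hmB]
      exact hleAll _ (List.mem_map_of_mem hj')
  omega

-- ===== VERDICT (by name: the statement is the Claim_ definition above) =====
theorem min_total_ascii_distance_spec : Claim_equal_min_total_ascii_distance := by
  intro A S hDom hPre
  unfold Spec_min_total_ascii_distance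
  rcases hPre with hA | hS
  · simp [min_total_ascii_distance, min_total_ascii_distance_alt, hA]
  · unfold Dom_min_total_ascii_distance at hDom
    rw [Bool.and_eq_true] at hDom
    obtain ⟨hDomA, hDomS⟩ := hDom
    have hDA : ∀ c ∈ A.toList, c.toNat ≤ 126 := by
      intro c hc
      have h := List.all_eq_true.mp (by simpa [pvDomStr] using hDomA) c hc
      simp [pvDomChar] at h
      omega
    have hDS : ∀ j ∈ S.toList, j.toNat ≤ 126 := by
      intro j hj
      have h := List.all_eq_true.mp (by simpa [pvDomStr] using hDomS) j hj
      simp [pvDomChar] at h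
      omega
    obtain ⟨j0, t0, hS0⟩ := List.exists_cons_of_ne_nil hS
    simp only [min_total_ascii_distance, min_total_ascii_distance_alt]
    rw [show (128 : Int) = ((128 : Nat) : Int) from by norm_num,
        pvLeftFold (PySem.Set.ofList (S.toList.map (fun j => ((j.toNat : Int))))) 128 (by norm_num)]
    simp only []
    rw [pvNearestEq]
    exact pvFoldl_congr _ _ A.toList
      (fun c hcmem a => by rw [pvChar_eq S j0 t0 hS0 hDS c (hDA c hcmem)]) 0
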